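-- pv_equiv track=rewrite | github.com/steveopen1/ApiRed | core/fuzzing/hybrid_fuzzer.py | _is_api_url
-- ===== SOURCE A (Python) =====
-- def _is_api_url(url: str) -> bool:
--     """判断是否是API URL"""
--     if not url:
--         return False
--
--     api_indicators = [
--         'api', 'v1', 'v2', 'v3', 'v4', 'rest', 'graphql',
--         'json', 'xml', 'swagger', 'openapi', 'oauth',
--         '/auth', '/user', '/admin', '/api/'
--     ]
--
--     url_lower = url.lower()
--     return any(indicator in url_lower for indicator in api_indicators)
-- ===== SOURCE B (Python) =====
-- _API_INDICATORS = (
--     'api', 'v1', 'v2', 'v3', 'v4', 'rest', 'graphql',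
--     'json', 'xml', 'swagger', 'openapi', 'oauth',
--     '/auth', '/user', '/admin', '/api/'
-- )
--
--
-- def _is_api_url(url: str) -> bool:
--     """判断是否是API URL"""
--     s = url.lower()
--     for i in range(len(s)):
--         for ind in _API_INDICATORS:
--             if s.startswith(ind, i):
--                 return True
--     return False
-- ===== Notes on version B (the rewrite author's own statement) =====
-- stated objective: alternative
-- what changed: B makes a single left-to-right scan over the lowered URL, testing at each position whether any indicator starts there (startswith at an offset), instead of A looping over the indicators and re-scanning the whole string for each via the membership operator; the empty-string guard disappears because the scan is vacuous.
import Mathlib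
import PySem

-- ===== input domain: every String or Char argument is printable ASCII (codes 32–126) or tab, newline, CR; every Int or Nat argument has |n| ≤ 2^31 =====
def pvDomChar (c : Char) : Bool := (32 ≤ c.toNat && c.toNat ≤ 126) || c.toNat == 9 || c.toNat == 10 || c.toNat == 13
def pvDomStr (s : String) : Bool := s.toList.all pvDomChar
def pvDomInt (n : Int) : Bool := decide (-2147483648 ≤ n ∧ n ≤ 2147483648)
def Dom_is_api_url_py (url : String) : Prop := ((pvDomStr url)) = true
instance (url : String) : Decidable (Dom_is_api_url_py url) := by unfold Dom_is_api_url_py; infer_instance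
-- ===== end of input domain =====

-- B replaces A's per-indicator substring tests by one left-to-right scan testing each position
-- with startswith (alternative decomposition, same cost class); return values proved equal.


-- ===== PORT A =====
def pvIndsA : List String :=
  ["api", "v1", "v2", "v3", "v4", "rest", "graphql",
   "json", "xml", "swagger", "openapi", "oauth",
   "/auth", "/user", "/admin", "/api/"]

def is_api_url_py (url : String) : Bool :=
  if url == "" then false
  else
    let url_lower := PySem.Str.lower url
    pvIndsA.any (fun indicator => PySem.Str.isIn indicator url_lower)

-- ===== PORT B =====
def pvIndsB : List String :=
  ["api", "v1", "v2", "v3", "v4", "rest", "graphql",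
   "json", "xml", "swagger", "openapi", "oauth",
   "/auth", "/user", "/admin", "/api/"]

-- the scan over positions: at each suffix, does some indicator start here?
def pvScan : List Char → Bool
  | [] => false
  | c :: t =>
      pvIndsB.any (fun ind => PySem.Chars.startswith (c :: t) ind.toList) || pvScan t

def is_api_url_py_alt (url : String) : Bool :=
  pvScan (PySem.Chars.lower url.toList)

-- ===== PRECONDITION & SPEC =====
def Spec_is_api_url_py (url : String) (out : Bool) : Prop := out = is_api_url_py_alt url
instance (url : String) (out : Bool) : Decidable (Spec_is_api_url_py url out) := by unfold Spec_is_api_url_py; infer_instance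

-- ===== CLAIM (what is proved, stated in full; the proofs are below) =====
def Claim_equal_is_api_url_py : Prop := ∀ (url : String), Dom_is_api_url_py url → Spec_is_api_url_py url (is_api_url_py url)

-- ===== LEMMAS AND PROOFS =====

theorem pvScan_iff (s : List Char) :
    pvScan s = true ↔ ∃ ind ∈ pvIndsB, ind.toList <:+: s := by
  induction s with
  | nil =>
      simp only [pvScan]
      constructor
      · intro h; exact absurd h (by decide)
      · rintro ⟨ind, hmem, hinf⟩
        have h0 : ind.toList = [] := List.eq_nil_of_infix_nil hinf
        fin_cases hmem <;> simp_all
  | cons c t ih =>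
      simp only [pvScan, Bool.or_eq_true, List.any_eq_true, PySem.Chars.startswith_iff, ih,
        List.infix_cons_iff]
      constructor
      · rintro (⟨ind, hm, hp⟩ | ⟨ind, hm, hi⟩)
        · exact ⟨ind, hm, Or.inl hp⟩
        · exact ⟨ind, hm, Or.inr hi⟩
      · rintro ⟨ind, hm, hp | hi⟩
        · exact Or.inl ⟨ind, hm, hp⟩
        · exact Or.inr ⟨ind, hm, hi⟩

-- ===== VERDICT (by name: the statement is the Claim_ definition above) =====
theorem is_api_url_py_spec : Claim_equal_is_api_url_py := by
  intro url _
  unfold Spec_is_api_url_py is_api_url_py is_api_url_py_alt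
  by_cases h : url = ""
  · subst h; simp [PySem.Chars.lower, pvScan]
  · rw [if_neg (by simpa using h)]
    rw [Bool.eq_iff_iff]
    simp only [List.any_eq_true, PySem.Str.isIn_eq, PySem.Chars.isIn_iff_infix,
      PySem.Str.toList_lower, pvScan_iff]
    constructor
    · rintro ⟨ind, hm, hi⟩; exact ⟨ind, by simpa [pvIndsA, pvIndsB] using hm, hi⟩
    · rintro ⟨ind, hm, hi⟩; exact ⟨ind, by simpa [pvIndsA, pvIndsB] using hm, hi⟩
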